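-- pv_equiv track=rewrite | github.com/stanford-crfm/levanter | src/levanter/optim/soap.py | _get_preconditioner_types
-- ===== SOURCE A (Python) =====
-- from typing import List, Optional, Tuple, Union
--
-- def _get_preconditioner_types(shape: Tuple[int, ...], max_precond_dim: int, one_diag: bool) -> List[bool]:
--     if len(shape) == 0:
--         return [False]
--
--     if len(shape) == 1:
--         return [False]
--
--     result = [s >= max_precond_dim for s in shape]
--     new_result = result
--     if one_diag:
--         new_result = []
--         flag = True
--         for i in range(len(result)):
--             if not result[i] and flag:
--                 new_result.append(False)
--                 flag = False
--             else:
--                 new_result.append(True)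
--
--     return new_result
-- ===== SOURCE B (Python) =====
-- def _get_preconditioner_types(shape, max_precond_dim, one_diag):
--     if len(shape) <= 1:
--         return [False]
--     if not one_diag:
--         return [s >= max_precond_dim for s in shape]
--     idx = next((i for i, s in enumerate(shape) if s < max_precond_dim), None)
--     return [i != idx for i in range(len(shape))]
-- ===== Notes on version B (the rewrite author's own statement) =====
-- stated objective: idiomatic
-- what changed: Replaces the flag-threaded accumulator loop of the one_diag branch by a find-first-index (next over enumerate) followed by a positional comprehension [i != idx ...]; the length guards are merged into one.
import Mathlib
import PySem

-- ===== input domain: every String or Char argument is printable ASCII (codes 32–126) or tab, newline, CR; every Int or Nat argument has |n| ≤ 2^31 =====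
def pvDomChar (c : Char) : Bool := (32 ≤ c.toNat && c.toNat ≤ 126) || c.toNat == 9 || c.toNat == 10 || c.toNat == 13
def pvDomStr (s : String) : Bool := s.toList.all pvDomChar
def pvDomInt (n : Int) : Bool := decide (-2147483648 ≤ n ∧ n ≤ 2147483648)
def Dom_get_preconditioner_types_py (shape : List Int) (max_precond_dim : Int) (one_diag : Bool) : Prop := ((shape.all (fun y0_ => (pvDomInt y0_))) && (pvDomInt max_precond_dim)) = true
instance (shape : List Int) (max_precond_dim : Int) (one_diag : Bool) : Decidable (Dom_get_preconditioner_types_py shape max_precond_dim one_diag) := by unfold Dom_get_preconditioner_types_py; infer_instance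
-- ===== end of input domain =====

-- ===== PORT A =====
-- B replaces the flag-threaded one_diag loop by find-first-index + positional map (idiomatic).
def get_preconditioner_types_py (shape : List Int) (max_precond_dim : Int) (one_diag : Bool) : List Bool :=
  if shape.length == 0 then [false]
  else if shape.length == 1 then [false]
  else
    let result := shape.map (fun s => decide (s ≥ max_precond_dim))
    if one_diag then
      -- for i in range(len(result)): flag-threaded append loop
      (result.foldl
        (fun (p : List Bool × Bool) r =>
          if !r && p.2 then (p.1 ++ [false], false) else (p.1 ++ [true], p.2))
        ([], true)).1
    else result

-- ===== PORT B =====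
def get_preconditioner_types_py_alt (shape : List Int) (max_precond_dim : Int) (one_diag : Bool) : List Bool :=
  if shape.length ≤ 1 then [false]
  else if !one_diag then shape.map (fun s => decide (s ≥ max_precond_dim))
  else
    let idx := shape.findIdx? (fun s => decide (s < max_precond_dim))
    (List.range shape.length).map (fun i => decide (some i ≠ idx))

-- ===== PRECONDITION & SPEC =====
def Spec_get_preconditioner_types_py (shape : List Int) (max_precond_dim : Int) (one_diag : Bool) (out : List Bool) : Prop := out = get_preconditioner_types_py_alt shape max_precond_dim one_diag
instance (shape : List Int) (max_precond_dim : Int) (one_diag : Bool) (out : List Bool) : Decidable (Spec_get_preconditioner_types_py shape max_precond_dim one_diag out) := by unfold Spec_get_preconditioner_types_py; infer_instance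

-- ===== CLAIM =====
def Claim_equal_get_preconditioner_types_py : Prop := ∀ (shape : List Int) (max_precond_dim : Int) (one_diag : Bool), Dom_get_preconditioner_types_py shape max_precond_dim one_diag → Spec_get_preconditioner_types_py shape max_precond_dim one_diag (get_preconditioner_types_py shape max_precond_dim one_diag)

-- ===== LEMMAS AND PROOFS =====

-- once the flag is false, the loop appends true for every remaining element
theorem pv_loop_false (rs acc : List Bool) :
    (rs.foldl
      (fun (p : List Bool × Bool) r =>
        if !r && p.2 then (p.1 ++ [false], false) else (p.1 ++ [true], p.2))
      (acc, false)).1 = acc ++ rs.map (fun _ => true) := by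
  induction rs generalizing acc with
  | nil => simp
  | cons r rs ih =>
    rw [List.foldl_cons]
    have hstep : (if (!r && (acc, false).2) = true then ((acc, false).1 ++ [false], false)
        else ((acc, false).1 ++ [true], (acc, false).2)) = (acc ++ [true], false) := by simp
    rw [hstep, ih]
    simp

-- with the flag still true, the loop computes "true except at the first false"
theorem pv_loop_true (rs acc : List Bool) :
    (rs.foldl
      (fun (p : List Bool × Bool) r =>
        if !r && p.2 then (p.1 ++ [false], false) else (p.1 ++ [true], p.2))
      (acc, true)).1
      = acc ++ (List.range rs.length).map
          (fun i => decide (some i ≠ rs.findIdx? (fun r => !r))) := by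
  induction rs generalizing acc with
  | nil => simp
  | cons r rs ih =>
    cases r with
    | false =>
      rw [List.foldl_cons]
      have hstep : (if (!false && (acc, true).2) = true then ((acc, true).1 ++ [false], false)
          else ((acc, true).1 ++ [true], (acc, true).2)) = (acc ++ [false], false) := by simp
      rw [hstep, pv_loop_false]
      simp [List.range_succ_eq_map, List.findIdx?_cons, List.map_map, Function.comp_def,
        List.map_const']
    | true =>
      rw [List.foldl_cons]
      have hstep : (if (!true && (acc, true).2) = true then ((acc, true).1 ++ [false], false)
          else ((acc, true).1 ++ [true], (acc, true).2)) = (acc ++ [true], true) := by simp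
      rw [hstep, ih]
      have hidx : ∀ (o : Option Nat) (i : Nat),
          decide (some (i + 1) ≠ Option.map (· + 1) o) = decide (some i ≠ o) := by
        intro o i; cases o <;> simp
      simp [List.range_succ_eq_map, List.findIdx?_cons, List.map_map, Function.comp, hidx]
      intro a _
      cases h : List.findIdx? (fun r => !r) rs with
      | none => simp
      | some b => simp [eq_comm]

-- the first sub-threshold dim of shape is the first false of result
theorem pv_findIdx?_map (shape : List Int) (m : Int) :
    (shape.map (fun s => decide (s ≥ m))).findIdx? (fun r => !r)
      = shape.findIdx? (fun s => decide (s < m)) := by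
  induction shape with
  | nil => rfl
  | cons s shape ih =>
    simp only [List.map_cons, List.findIdx?_cons, ih]
    by_cases h : s < m
    · simp [h, not_le.mpr h]
    · simp [h, not_lt.mp h]

-- ===== VERDICT =====
theorem get_preconditioner_types_py_spec : Claim_equal_get_preconditioner_types_py := by
  intro shape m od _
  unfold Spec_get_preconditioner_types_py get_preconditioner_types_py get_preconditioner_types_py_alt
  by_cases h0 : shape.length = 0
  · simp [h0]
  · by_cases h1 : shape.length = 1
    · simp [h0, h1]
    · have hgt : ¬ shape.length ≤ 1 := by omega
      cases od with
      | false => simp [h0, h1, hgt]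
      | true =>
        simp only [h0, h1, hgt, beq_iff_eq, if_neg h0, if_neg h1, if_neg hgt, if_pos rfl,
          Bool.not_true, Bool.false_eq_true, ite_false, ite_true]
        rw [pv_loop_true, pv_findIdx?_map]
        simp
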